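-- pv_equiv track=rewrite | github.com/Anthrobyte-Team/DAG_Demo | MLAgent/data_utils.py | _nice_step_for_range
-- ===== SOURCE A (Python) =====
-- def _nice_step_for_range(qmin: int, qmax: int, approx_steps: int = 10) -> int:
--     rng = max(1, int(qmax) - int(qmin))
--     raw = max(1, rng // approx_steps)
--     # round to 1/2/5/10 * 10^k
--     base = 1
--     while base * 10 < raw:
--         base *= 10
--     for mult in (1, 2, 5, 10):
--         s = base * mult
--         if s >= raw:
--             return s
--     return max(1, raw)
-- ===== SOURCE B (Python) =====
-- def _nice_step_for_range(qmin: int, qmax: int, approx_steps: int = 10) -> int: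
--     rng = max(1, int(qmax) - int(qmin))
--     raw = max(1, rng // approx_steps)
--     # closed form: decimal magnitude from the digit count, then the leading
--     # multiplier from a ceiling division -- no candidate scan at all
--     p = 10 ** (len(str(raw)) - 1)      # largest power of ten <= raw
--     lead = -(-raw // p)                # ceil(raw / p), always in 1..10
--     mult = 1 if lead == 1 else 2 if lead == 2 else 5 if lead <= 5 else 10
--     return mult * p
-- ===== Notes on version B (the rewrite author's own statement) =====
-- stated objective: alternative
-- what changed: Replaced A's two loops (a while loop growing a power-of-ten base, then a scan over multipliers (1,2,5,10)) by a loop-free closed form: the decimal magnitude is read off as 10**(len(str(raw))-1) and the multiplier is chosen from the leading value ceil(raw/magnitude) by a three-way comparison.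
import Mathlib
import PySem

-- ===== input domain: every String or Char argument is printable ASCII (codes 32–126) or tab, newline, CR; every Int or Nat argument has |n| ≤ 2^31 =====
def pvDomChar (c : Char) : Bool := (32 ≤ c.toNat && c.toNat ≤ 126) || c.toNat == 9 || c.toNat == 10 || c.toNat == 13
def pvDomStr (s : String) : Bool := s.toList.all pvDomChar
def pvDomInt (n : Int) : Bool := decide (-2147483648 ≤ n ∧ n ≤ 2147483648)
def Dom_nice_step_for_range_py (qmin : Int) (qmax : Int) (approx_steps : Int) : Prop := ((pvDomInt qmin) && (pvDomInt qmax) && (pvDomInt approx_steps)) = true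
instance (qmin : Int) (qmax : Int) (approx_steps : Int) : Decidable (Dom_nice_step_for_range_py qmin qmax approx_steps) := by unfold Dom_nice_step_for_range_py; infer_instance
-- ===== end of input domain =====

-- B replaces A's two loops (grow a power-of-ten base, then scan multipliers 1,2,5,10) by a
-- loop-free closed form: magnitude 10^(len(str(raw))-1) and a ceiling-division leading digit
-- (objective: alternative).

-- ===== PORT A =====
-- A's `base` variable is always a power of ten; it is carried here as its exponent p
-- (base = 10^p), so the loop computes exactly the same successive base values.
def pvWhileBase (raw : Int) (p : Nat) : Nat :=
  if (10:Int)^p * 10 < raw then pvWhileBase raw (p + 1) else p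
termination_by (raw - (10:Int)^p).toNat
decreasing_by
  have h1 : (1:Int) ≤ (10:Int)^p := one_le_pow₀ (by norm_num)
  have h2 : (10:Int)^(p+1) = (10:Int)^p * 10 := pow_succ 10 p
  omega

def nice_step_for_range_py (qmin : Int) (qmax : Int) (approx_steps : Int) : Int :=
  let rng := max 1 (qmax - qmin)
  let raw := max 1 (PySem.Int.floordiv rng approx_steps)
  let base : Int := (10:Int) ^ pvWhileBase raw 0
  -- for mult in (1, 2, 5, 10): if base*mult >= raw: return base*mult — unrolled
  if base * 1 ≥ raw then base * 1
  else if base * 2 ≥ raw then base * 2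
  else if base * 5 ≥ raw then base * 5
  else if base * 10 ≥ raw then base * 10
  else max 1 raw

-- ===== PORT B =====
def nice_step_for_range_py_alt (qmin : Int) (qmax : Int) (approx_steps : Int) : Int :=
  let rng := max 1 (qmax - qmin)
  let raw := max 1 (PySem.Int.floordiv rng approx_steps)
  -- p = 10 ** (len(str(raw)) - 1); raw ≥ 1 so the exponent is ≥ 0 and .toNat is exact
  let d : Int := PySem.Str.len (PySem.Int.toStr raw)
  let p : Int := (10:Int) ^ (d - 1).toNat
  -- lead = -(-raw // p): the ceiling division ceil(raw / p)
  let lead : Int := -(PySem.Int.floordiv (-raw) p)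
  (if lead = 1 then 1 else if lead = 2 then 2 else if lead ≤ 5 then 5 else 10) * p

-- ===== PRECONDITION & SPEC =====
-- Pre_ excludes approx_steps = 0, on which A (and B) raise ZeroDivisionError.
def Pre_nice_step_for_range_py (qmin : Int) (qmax : Int) (approx_steps : Int) : Prop :=
  approx_steps ≠ 0
instance (qmin : Int) (qmax : Int) (approx_steps : Int) : Decidable (Pre_nice_step_for_range_py qmin qmax approx_steps) := by unfold Pre_nice_step_for_range_py; infer_instance

def pvWitness_nice_step_for_range_py : Int × Int × Int := (0, 137, 10)

def Spec_nice_step_for_range_py (qmin : Int) (qmax : Int) (approx_steps : Int) (out : Int) : Prop := out = nice_step_for_range_py_alt qmin qmax approx_steps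
instance (qmin : Int) (qmax : Int) (approx_steps : Int) (out : Int) : Decidable (Spec_nice_step_for_range_py qmin qmax approx_steps out) := by unfold Spec_nice_step_for_range_py; infer_instance

-- ===== CLAIM (what is proved, stated in full; the proofs are below) =====
def Claim_equal_nice_step_for_range_py : Prop := ∀ (qmin : Int) (qmax : Int) (approx_steps : Int), Dom_nice_step_for_range_py qmin qmax approx_steps → Pre_nice_step_for_range_py qmin qmax approx_steps → Spec_nice_step_for_range_py qmin qmax approx_steps (nice_step_for_range_py qmin qmax approx_steps)

-- ===== LEMMAS AND PROOFS =====

-- exact length of Nat.toDigitsCore (Mathlib only has the ≤ bound, toDigits_length)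
lemma pvTdcLen : ∀ (f n : Nat) (l : List Char), 0 < n → n < f →
    (Nat.toDigitsCore 10 f n l).length = Nat.log 10 n + 1 + l.length := by
  intro f
  induction f with
  | zero => intro n l h1 h2; omega
  | succ f ih =>
      intro n l h1 h2
      rw [Nat.toDigitsCore]
      by_cases hz : n / 10 = 0
      · have hn : n < 10 := by omega
        rw [if_pos hz, Nat.log_eq_zero_iff.mpr (Or.inl hn)]
        simp
        omega
      · rw [if_neg hz, ih (n / 10) _ (by omega) (by
          have := Nat.div_lt_self h1 (by norm_num : 1 < 10); omega)]
        have h10 : 10 ≤ n := by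
          by_contra hc; exact hz (Nat.div_eq_of_lt (by omega))
        rw [Nat.log_div_base]
        have hlog : 1 ≤ Nat.log 10 n := Nat.log_pos (by norm_num) h10
        simp only [List.length_cons]
        omega

-- str(n) of a positive integer has log₁₀(n)+1 characters
lemma pvToCharsLen (n : Int) (h : 1 ≤ n) :
    (PySem.Int.toChars n).length = Nat.log 10 n.toNat + 1 := by
  unfold PySem.Int.toChars
  rw [if_neg (by omega)]
  unfold Nat.toDigits
  rw [pvTdcLen (n.toNat + 1) n.toNat [] (by omega) (by omega)]
  simp

-- exponents of a power-of-ten interval containing x are unique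
lemma pvPowUnique (a b : Nat) (x : Int) (h1 : (10:Int)^a ≤ x) (h2 : x < 10^(a+1))
    (h3 : (10:Int)^b ≤ x) (h4 : x < 10^(b+1)) : a = b := by
  by_contra hne
  rcases Nat.lt_or_ge a b with h | h
  · have : (10:Int)^(a+1) ≤ (10:Int)^b := pow_le_pow_right₀ (by norm_num) (by omega)
    omega
  · have hba : b < a := by omega
    have : (10:Int)^(b+1) ≤ (10:Int)^a := pow_le_pow_right₀ (by norm_num) (by omega)
    omega

-- A's tail (base loop + multiplier scan) equals B's closed form, for any exponent e
-- bracketing raw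
lemma pvTailEq (raw : Int) (e : Nat) (hle : (10:Int)^e ≤ raw) (hlt : raw < (10:Int)^(e+1)) :
    ∀ (p : Nat), ((10:Int)^p < raw ∨ p = 0) →
    (let base : Int := (10:Int) ^ pvWhileBase raw p
     if base * 1 ≥ raw then base * 1
     else if base * 2 ≥ raw then base * 2
     else if base * 5 ≥ raw then base * 5
     else if base * 10 ≥ raw then base * 10
     else max 1 raw)
    =
    (let pw : Int := (10:Int) ^ e
     let lead : Int := -(PySem.Int.floordiv (-raw) pw)
     (if lead = 1 then 1 else if lead = 2 then 2 else if lead ≤ 5 then 5 else 10) * pw) := by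
  have hpw : (0:Int) < (10:Int)^e := by positivity
  have hraw : 1 ≤ raw := le_trans (one_le_pow₀ (by norm_num)) hle
  -- bounds of the ceiling division: (lead-1)*10^e < raw ≤ lead*10^e
  set lead : Int := -(PySem.Int.floordiv (-raw) ((10:Int)^e)) with hlead
  have hc : (lead - 1) * (10:Int)^e < raw ∧ raw ≤ lead * (10:Int)^e :=
    (PySem.Int.neg_floordiv_neg_eq_iff_of_pos hpw).mp rfl
  intro p
  induction p using pvWhileBase.induct (raw := raw) with
  | case1 p hcond ih =>
      intro _
      rw [pvWhileBase, if_pos hcond]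
      exact ih (Or.inl (by have := pow_succ (10:Int) p; omega))
  | case2 p hcond =>
      intro hp
      rw [pvWhileBase, if_neg hcond]
      -- stop: raw ≤ 10^(p+1), and 10^p < raw or p = 0
      have hstop : raw ≤ (10:Int)^(p+1) := by have := pow_succ (10:Int) p; omega
      have hp1 : (0:Int) < (10:Int)^p := by positivity
      have hps : (10:Int)^(p+1) = (10:Int)^p * 10 := pow_succ 10 p
      simp only
      by_cases b1 : (10:Int)^p * 1 ≥ raw
      · -- base ≥ raw: forces p = 0 and raw = 1, hence e = 0, lead = 1
        rw [if_pos b1]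
        have hp0 : p = 0 := by
          rcases hp with h | h
          · omega
          · exact h
        have hraw1 : raw = 1 := by
          rw [hp0] at b1; simp at b1; omega
        have he0 : e = 0 := pvPowUnique e 0 raw hle hlt (by simp; omega) (by norm_num; omega)
        have hl1 : lead = 1 := by
          rw [he0] at hc; simp at hc; omega
        rw [if_pos hl1, hp0, he0]
        norm_num
      · rw [if_neg b1]
        by_cases b2 : (10:Int)^p * 2 ≥ raw
        · -- 10^p < raw ≤ 2*10^p : e = p, lead = 2
          rw [if_pos b2]
          have hplt : (10:Int)^p < raw := by omega
          have hep : e = p := pvPowUnique e p raw hle hlt hplt.le (by omega)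
          subst hep
          have hl2 : lead = 2 := by
            have ha : lead ≤ 2 := by nlinarith [hc.1]
            have hb : 2 ≤ lead := by nlinarith [hc.2]
            omega
          rw [if_neg (by omega), if_pos hl2]; omega
        · rw [if_neg b2]
          by_cases b5 : (10:Int)^p * 5 ≥ raw
          · -- 2*10^p < raw ≤ 5*10^p : e = p, 3 ≤ lead ≤ 5
            rw [if_pos b5]
            have hplt : (10:Int)^p < raw := by omega
            have hep : e = p := pvPowUnique e p raw hle hlt hplt.le (by omega)
            subst hep
            have hl : 3 ≤ lead ∧ lead ≤ 5 := by
              constructor <;> nlinarith [hc.1, hc.2]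
            rw [if_neg (by omega), if_neg (by omega), if_pos (by omega)]; omega
          · rw [if_neg b5]
            have b10 : (10:Int)^p * 10 ≥ raw := by omega
            rw [if_pos b10]
            -- 5*10^p < raw ≤ 10*10^p : either e = p (lead ∈ 6..10) or raw = 10^(p+1) (lead = 1)
            by_cases hx : raw < (10:Int)^(p+1)
            · have hplt : (10:Int)^p < raw := by omega
              have hep : e = p := pvPowUnique e p raw hle hlt hplt.le hx
              subst hep
              have hl : 6 ≤ lead := by nlinarith [hc.2]
              rw [if_neg (by omega), if_neg (by omega), if_neg (by omega)]; omega
            · have hx' : raw = (10:Int)^(p+1) := by omega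
              have hep : e = p + 1 := by
                apply pvPowUnique e (p+1) raw hle hlt (by omega)
                have : (10:Int)^(p+1+1) = (10:Int)^(p+1) * 10 := pow_succ 10 (p+1)
                nlinarith
              subst hep
              have hl1 : lead = 1 := by
                have ha : lead ≤ 1 := by nlinarith [hc.1]
                have hb : 1 ≤ lead := by nlinarith [hc.2]
                omega
              rw [if_pos hl1]
              omega

-- the two full bodies agree for any raw ≥ 1
lemma pvBodyEq (raw : Int) (hraw : 1 ≤ raw) :
    (let base : Int := (10:Int) ^ pvWhileBase raw 0
     if base * 1 ≥ raw then base * 1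
     else if base * 2 ≥ raw then base * 2
     else if base * 5 ≥ raw then base * 5
     else if base * 10 ≥ raw then base * 10
     else max 1 raw)
    =
    (let d : Int := PySem.Str.len (PySem.Int.toStr raw)
     let p : Int := (10:Int) ^ (d - 1).toNat
     let lead : Int := -(PySem.Int.floordiv (-raw) p)
     (if lead = 1 then 1 else if lead = 2 then 2 else if lead ≤ 5 then 5 else 10) * p) := by
  have hd : PySem.Str.len (PySem.Int.toStr raw) = ((Nat.log 10 raw.toNat + 1 : Nat) : Int) := by
    rw [PySem.Str.len_eq, PySem.Int.toList_toStr, pvToCharsLen raw hraw]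
  have hexp : (PySem.Str.len (PySem.Int.toStr raw) - 1).toNat = Nat.log 10 raw.toNat := by
    rw [hd]; omega
  have h1 : (10:Int) ^ Nat.log 10 raw.toNat ≤ raw := by
    have := Nat.pow_log_le_self 10 (show raw.toNat ≠ 0 by omega)
    have hcast : ((10 ^ Nat.log 10 raw.toNat : Nat) : Int) ≤ ((raw.toNat : Nat) : Int) := by
      exact_mod_cast this
    push_cast at hcast; omega
  have h2 : raw < (10:Int) ^ (Nat.log 10 raw.toNat + 1) := by
    have := Nat.lt_pow_succ_log_self (b := 10) (by norm_num) raw.toNat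
    have hcast : ((raw.toNat : Nat) : Int) < ((10 ^ (Nat.log 10 raw.toNat + 1) : Nat) : Int) := by
      exact_mod_cast this
    push_cast at hcast; omega
  simp only [hexp]
  exact pvTailEq raw (Nat.log 10 raw.toNat) h1 h2 0 (Or.inr rfl)

-- ===== VERDICT (by name: the statement is the Claim_ definition above) =====
theorem nice_step_for_range_py_spec : Claim_equal_nice_step_for_range_py := by
  intro qmin qmax approx_steps _ _
  unfold Spec_nice_step_for_range_py nice_step_for_range_py nice_step_for_range_py_alt
  exact pvBodyEq _ (le_max_left 1 _)
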